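-- pv_equiv track=rewrite | github.com/seisdedosdiego/LEPL1401 | session 7/Création de dictionnaire des valeurs maximums.py | create_dict_max
-- ===== SOURCE A (Python) =====
-- def create_dict_max(l):
--     """ Voir au dessus """
--     d = {}
--     for i in l:
--         if i[0] in d:
--             if d[i[0]] < i[1]:
--                 d[i[0]] = i[1]
--         else:
--             d[i[0]] = i[1]
--     return d
-- ===== SOURCE B (Python) =====
-- def create_dict_max(l):
--     groups = {}
--     for i in l:
--         groups.setdefault(i[0], []).append(i[1])
--     return {k: max(vs) for k, vs in groups.items()}
-- ===== Notes on version B (the rewrite author's own statement) =====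
-- stated objective: alternative
-- what changed: Replaces A's single compare-and-update pass by a two-phase group-then-reduce: first build an index dict mapping each key to the list of its values, then take max over each bucket.
import Mathlib
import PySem

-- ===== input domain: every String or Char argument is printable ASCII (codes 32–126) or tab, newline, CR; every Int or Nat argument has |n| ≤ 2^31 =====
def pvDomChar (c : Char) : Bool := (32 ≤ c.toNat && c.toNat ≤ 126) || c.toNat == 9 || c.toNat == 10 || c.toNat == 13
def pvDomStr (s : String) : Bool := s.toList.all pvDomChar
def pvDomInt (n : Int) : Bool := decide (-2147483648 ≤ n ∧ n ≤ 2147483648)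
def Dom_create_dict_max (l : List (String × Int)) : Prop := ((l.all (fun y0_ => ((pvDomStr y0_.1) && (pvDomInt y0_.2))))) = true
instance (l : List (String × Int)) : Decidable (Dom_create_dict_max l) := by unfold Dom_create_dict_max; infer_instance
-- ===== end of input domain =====

-- B replaces A's compare-and-update pass by a group-then-reduce pass (index dict of value lists, then max per bucket); alternative decomposition, same cost.


-- ===== PORT A =====
-- A's loop body: d[i[0]] present? compare and maybe overwrite; else set.
def cdmStepA (d : PySem.Dict String Int) (i : String × Int) : PySem.Dict String Int :=
  if d.contains i.1 then
    (if d.getD i.1 0 < i.2 then d.insert i.1 i.2 else d)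
  else d.insert i.1 i.2

def create_dict_max (l : List (String × Int)) : List (String × Int) :=
  (l.foldl cdmStepA PySem.Dict.empty).items

-- ===== PORT B =====
-- groups.setdefault(i[0], []).append(i[1])
def cdmStepG (g : PySem.Dict String (List Int)) (i : String × Int) : PySem.Dict String (List Int) :=
  g.modify i.1 [] (fun vs => vs ++ [i.2])

-- max(vs); buckets are never empty so the .getD 0 default is never used
def cdmMax (vs : List Int) : Int := (PySem.List.max? vs (fun y => y)).getD 0

def create_dict_max_alt (l : List (String × Int)) : List (String × Int) :=
  let groups := l.foldl cdmStepG PySem.Dict.empty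
  (groups.items.foldl (fun r p => r.insert p.1 (cdmMax p.2)) PySem.Dict.empty).items

-- ===== PRECONDITION & SPEC =====
def Spec_create_dict_max (l : List (String × Int)) (out : List (String × Int)) : Prop := out = create_dict_max_alt l
instance (l : List (String × Int)) (out : List (String × Int)) : Decidable (Spec_create_dict_max l out) := by unfold Spec_create_dict_max; infer_instance

-- ===== CLAIM (what is proved, stated in full; the proofs are below) =====
def Claim_equal_create_dict_max : Prop := ∀ (l : List (String × Int)), Dom_create_dict_max l → Spec_create_dict_max l (create_dict_max l)

-- ===== LEMMAS AND PROOFS =====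

-- per-key combine of A's loop, seen through get?
def cdmComb (o : Option Int) (v : Int) : Option Int :=
  some (match o with | none => v | some m => if m < v then v else m)

theorem cdm_get_stepA (d : PySem.Dict String Int) (i : String × Int) (k : String) :
    (cdmStepA d i).get? k = if i.1 == k then cdmComb (d.get? k) i.2 else d.get? k := by
  unfold cdmStepA cdmComb
  by_cases hk : i.1 = k
  · subst hk
    simp only [beq_self_eq_true, if_pos]
    by_cases hc : d.contains i.1
    · have hs : (d.get? i.1).isSome = true := by
        rw [← PySem.Dict.contains_eq_isSome_get?]; exact hc
      obtain ⟨m, hm⟩ := Option.isSome_iff_exists.mp hs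
      rw [hc]
      have hDg : d.getD i.1 0 = m := PySem.Dict.getD_of_get?_eq_some d 0 hm
      simp only [hDg, hm, if_true]
      by_cases hlt : m < i.2
      · simp [hlt, PySem.Dict.get?_insert_self]
      · simp [hlt, hm]
    · have hn : d.get? i.1 = none := by
        rw [← Option.not_isSome_iff_eq_none, ← PySem.Dict.contains_eq_isSome_get?]
        simp [hc]
      simp [hc, hn, PySem.Dict.get?_insert_self]
  · have hbeq : (i.1 == k) = false := by simp [hk]
    have hne : k ≠ i.1 := fun h => hk h.symm
    simp only [hbeq, Bool.false_eq_true, if_false]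
    by_cases hc : d.contains i.1
    · simp only [hc, if_true]
      split_ifs <;> simp [PySem.Dict.get?_insert_of_ne _ _ hne]
    · simp only [hc, Bool.false_eq_true, if_false]
      exact PySem.Dict.get?_insert_of_ne _ _ hne

theorem cdm_getA (l : List (String × Int)) (d : PySem.Dict String Int) (k : String) :
    (l.foldl cdmStepA d).get? k =
      ((l.filter (fun p => p.1 == k)).map (·.2)).foldl cdmComb (d.get? k) := by
  induction l generalizing d with
  | nil => rfl
  | cons i t ih =>
    simp only [List.foldl_cons, List.filter_cons]
    rw [ih]
    by_cases hk : i.1 = k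
    · simp [cdm_get_stepA, hk]
    · simp [cdm_get_stepA, hk]

theorem cdm_keys_eq (l : List (String × Int)) (d : PySem.Dict String Int)
    (g : PySem.Dict String (List Int)) (h : d.keys = g.keys) :
    (l.foldl cdmStepA d).keys = (l.foldl cdmStepG g).keys := by
  induction l generalizing d g with
  | nil => exact h
  | cons i t ih =>
    apply ih
    have hcd : d.contains i.1 = g.contains i.1 := by
      rw [PySem.Dict.contains_eq_decide_mem_keys, PySem.Dict.contains_eq_decide_mem_keys, h]
    unfold cdmStepA cdmStepG
    by_cases hc : g.contains i.1
    · rw [hcd, hc]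
      simp only [if_true, PySem.Dict.keys_modify, PySem.Dict.keys_insert_of_contains _ _ hc]
      split_ifs
      · rw [PySem.Dict.keys_insert_of_contains _ _ (hcd.trans hc)]; exact h
      · exact h
    · have hc' : g.contains i.1 = false := by simpa using hc
      rw [hcd, hc']
      simp only [Bool.false_eq_true, if_false, PySem.Dict.keys_modify]
      rw [PySem.Dict.keys_insert_of_not_contains _ _ hc',
          PySem.Dict.keys_insert_of_not_contains _ _ (hcd.trans hc'), h]

theorem cdm_nodupA (l : List (String × Int)) (d : PySem.Dict String Int)
    (h : d.keys.Nodup) : (l.foldl cdmStepA d).keys.Nodup := by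
  induction l generalizing d with
  | nil => exact h
  | cons i t ih =>
    apply ih
    unfold cdmStepA
    split_ifs <;> first | exact PySem.Dict.nodup_keys_insert _ _ _ h | exact h

theorem cdm_comb_max (v : Int) (t : List Int) :
    t.foldl cdmComb (cdmComb none v) = some (cdmMax (v :: t)) := by
  rw [cdmMax, PySem.List.max?_id_cons]
  induction t generalizing v with
  | nil => rfl
  | cons w t ih =>
    simp only [List.foldl_cons]
    have : cdmComb (cdmComb none v) w = cdmComb none (max v w) := by
      unfold cdmComb; simp only []
      by_cases h : v < w
      · simp [h, max_eq_right (le_of_lt h)]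
      · simp [h, max_eq_left (not_lt.mp h)]
    rw [this, ih]

-- ===== VERDICT (by name: the statement is the Claim_ definition above) =====
theorem create_dict_max_spec : Claim_equal_create_dict_max := by
  unfold Claim_equal_create_dict_max Spec_create_dict_max
  intro l _
  unfold create_dict_max create_dict_max_alt
  have hng : (l.foldl cdmStepG PySem.Dict.empty).keys.Nodup := by
    unfold cdmStepG
    exact PySem.Dict.nodup_keys_foldl_modify_key l (·.1) [] _ _ (by simp)
  have hnd : (l.foldl cdmStepA PySem.Dict.empty).keys.Nodup :=
    cdm_nodupA l _ (by simp)
  have hkeys : (l.foldl cdmStepA PySem.Dict.empty).keys = (l.foldl cdmStepG PySem.Dict.empty).keys :=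
    cdm_keys_eq l _ _ (by simp)
  have hfresh : ((l.foldl cdmStepG PySem.Dict.empty).items.foldl
      (fun r p => r.insert p.1 (cdmMax p.2)) PySem.Dict.empty).items =
      (l.foldl cdmStepG PySem.Dict.empty).items.map (fun p => (p.1, cdmMax p.2)) := by
    rw [PySem.Dict.items_foldl_insert_fresh _ _ _ _ (by simp) hng]
    simp [PySem.Dict.empty]
  rw [hfresh]
  rw [PySem.Dict.items_eq_map_keys _ hnd 0, PySem.Dict.items_eq_map_keys _ hng [], List.map_map]
  rw [hkeys]
  apply List.map_congr_left
  intro k hk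
  simp only [Function.comp]
  have hgd : (l.foldl cdmStepG PySem.Dict.empty).getD k [] =
      (l.filter (fun p => p.1 == k)).map (·.2) := by
    unfold cdmStepG
    rw [PySem.Dict.getD_foldl_modify_append]
    simp
  have hget : (l.foldl cdmStepA PySem.Dict.empty).get? k =
      ((l.filter (fun p => p.1 == k)).map (·.2)).foldl cdmComb none := by
    rw [cdm_getA]
    simp
  cases hvs : (l.filter (fun p => p.1 == k)).map (·.2) with
  | nil =>
    exfalso
    have hmem : k ∈ (l.foldl cdmStepA PySem.Dict.empty).keys := hkeys ▸ hk
    have : (l.foldl cdmStepA PySem.Dict.empty).get? k = none := by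
      rw [hget, hvs]; rfl
    exact ((PySem.Dict.get?_eq_none_iff_not_mem_keys _ _).mp this) hmem
  | cons v t =>
    have hsome : (l.foldl cdmStepA PySem.Dict.empty).get? k = some (cdmMax (v :: t)) := by
      rw [hget, hvs, List.foldl_cons, cdm_comb_max]
    rw [PySem.Dict.getD_of_get?_eq_some _ 0 hsome, hgd, hvs]
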